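-- pv_equiv track=rewrite | github.com/lwiklendt/lsw | collect.py | permutation_swaps
-- ===== SOURCE A (Python) =====
-- from typing import List, Tuple, Iterator
--
-- def permutation_swaps(n: int) -> Iterator[Tuple[int, int]]:
--     """
--     Heap's algorithm for generating permutation swaps.
--     :param n: number of elements to permute
--     :return: generator yielding a pair of indexes for which pair of elements should be swapped
--     """
--     c = [0] * n
--     i = 0
--     while i < n:
--         if c[i] < i:
--             if i % 2 == 0:
--                 yield 0, i
--             else:
--                 yield c[i], i
--             c[i] += 1
--             i = 0
--         else:
--             c[i] = 0
--             i += 1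
-- ===== SOURCE B (Python) =====
-- def permutation_swaps(n):
--     """Recursive formulation of Heap's algorithm (same swap sequence as the
--     iterative counter-array version)."""
--     def heap(k):
--         if k <= 1:
--             return
--         for i in range(k):
--             yield from heap(k - 1)
--             if i < k - 1:
--                 yield (0, k - 1) if k % 2 == 1 else (i, k - 1)
--     yield from heap(n)
-- ===== Notes on version B (the rewrite author's own statement) =====
-- stated objective: alternative
-- what changed: Replaces the iterative counter-array state machine of Heap's algorithm with the classical recursive formulation (an inner recursive generator over the first k elements), yielding the identical swap sequence.
import Mathlib
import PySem

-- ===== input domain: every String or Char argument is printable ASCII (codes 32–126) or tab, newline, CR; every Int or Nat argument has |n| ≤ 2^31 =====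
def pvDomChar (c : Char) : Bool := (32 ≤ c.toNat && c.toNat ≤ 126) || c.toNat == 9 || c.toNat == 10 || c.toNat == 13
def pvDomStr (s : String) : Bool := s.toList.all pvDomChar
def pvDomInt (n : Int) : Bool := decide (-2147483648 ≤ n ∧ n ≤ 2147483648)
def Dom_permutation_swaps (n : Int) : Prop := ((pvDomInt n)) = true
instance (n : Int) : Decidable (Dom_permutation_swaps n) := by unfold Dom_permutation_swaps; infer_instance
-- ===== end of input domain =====

-- B replaces A's iterative counter-array loop by the recursive formulation of
-- Heap's algorithm (different decomposition, same exact swap sequence).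
-- Both Pythons are generators; the ports return the list of all yielded pairs.

-- ===== PORT A =====
-- exact number of loop iterations the while-loop performs before the pointer
-- first reaches level k (used only as a totality guard / fuel for the loop)
def pvFuelA : Nat → Nat
  | 0 => 0
  | k + 1 => pvFuelA k + k * (1 + pvFuelA k) + 1

-- literal transcription of A's while-loop; fuel is a pure totality guard
-- (pvFuelA n + 1 is exactly enough, proved below); the pointer i and bound n
-- are kept as Nat since A guarantees 0 ≤ i and the loop runs iff 0 < n.
def pvLoopA : Nat → List Int → Nat → Nat → List (Int × Int)
  | 0, _, _, _ => []
  | fuel + 1, c, i, n =>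
    if i < n then
      if c.getD i 0 < (i : Int) then
        (if i % 2 = 0 then ((0 : Int), (i : Int)) else (c.getD i 0, (i : Int))) ::
          pvLoopA fuel (c.set i (c.getD i 0 + 1)) 0 n
      else
        pvLoopA fuel (c.set i 0) (i + 1) n
    else []

def permutation_swaps (n : Int) : List (Int × Int) :=
  pvLoopA (pvFuelA n.toNat + 1) (List.replicate n.toNat 0) 0 n.toNat

-- ===== PORT B =====
-- literal transcription of Source B's recursive generator heap(k)
def pvHeapB : Nat → List (Int × Int)
  | 0 => []
  | 1 => []
  | k + 2 =>
    (List.range (k + 2)).flatMap fun i =>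
      pvHeapB (k + 1) ++
        (if i < k + 1 then
          [if (k + 2) % 2 = 1 then ((0 : Int), ((k + 1 : Nat) : Int))
           else ((i : Int), ((k + 1 : Nat) : Int))]
         else [])

def permutation_swaps_alt (n : Int) : List (Int × Int) := pvHeapB n.toNat

-- ===== PRECONDITION & SPEC =====
def Spec_permutation_swaps (n : Int) (out : List (Int × Int)) : Prop := out = permutation_swaps_alt n
instance (n : Int) (out : List (Int × Int)) : Decidable (Spec_permutation_swaps n out) := by unfold Spec_permutation_swaps; infer_instance

-- ===== CLAIM (what is proved, stated in full; the proofs are below) =====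
def Claim_equal_permutation_swaps : Prop := ∀ (n : Int), Dom_permutation_swaps n → Spec_permutation_swaps n (permutation_swaps n)

-- ===== LEMMAS AND PROOFS =====

-- the swap A yields at pointer level k when c[k] = t
def pvPair (k t : Nat) : Int × Int :=
  if k % 2 = 0 then ((0 : Int), (k : Int)) else ((t : Int), (k : Int))

-- trace emitted from pointer level k with counter value t (zeros below k)
def pvSeg (k t : Nat) : List (Int × Int) :=
  if t < k then pvPair k t :: (pvHeapB k ++ pvSeg k (t + 1)) else []
termination_by k - t

theorem pvLoopA_stop (f : Nat) (c : List Int) (i n : Nat) (h : ¬ i < n) :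
    pvLoopA f c i n = [] := by
  cases f <;> simp [pvLoopA, h]

theorem pv_getD_set_self (c : List Int) (j : Nat) (v : Int) (h : j < c.length) :
    (c.set j v).getD j 0 = v := by
  simp [List.getD, h]

theorem pv_getD_set_ne (c : List Int) (i j : Nat) (v : Int) (h : j ≠ i) :
    (c.set i v).getD j 0 = c.getD j 0 := by
  simp [List.getD, List.getElem?_set_ne (Ne.symm h)]

theorem pv_set_zero_self (c : List Int) (j : Nat) (h : j < c.length)
    (h0 : c.getD j 0 = 0) : c.set j 0 = c := by
  apply List.ext_getElem?
  intro m
  rw [List.getElem?_set]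
  split_ifs with h1
  · subst h1
    have hg := List.getElem?_eq_getElem h
    simp [List.getD, hg] at h0
    simp [hg, h0]
  · rfl

theorem pvSeg_of_lt (k t : Nat) (htk : t < k) :
    pvSeg k t = pvPair k t :: (pvHeapB k ++ pvSeg k (t + 1)) := by
  rw [pvSeg, if_pos htk]

theorem pvHeapB_succ (k : Nat) : pvHeapB (k + 1) = pvHeapB k ++ pvSeg k 0 := by
  cases k with
  | zero => simp [pvHeapB, pvSeg]
  | succ k =>
    have aux : ∀ d t, t + (d + 1) = k + 2 →
        ((List.range' t (d + 1)).flatMap fun i =>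
          pvHeapB (k + 1) ++
            (if i < k + 1 then
              [if (k + 2) % 2 = 1 then ((0 : Int), ((k + 1 : Nat) : Int))
               else ((i : Int), ((k + 1 : Nat) : Int))]
             else [])) = pvHeapB (k + 1) ++ pvSeg (k + 1) t := by
      intro d
      induction d with
      | zero =>
        intro t ht
        have ht' : t = k + 1 := by omega
        subst ht'
        rw [pvSeg]
        simp
      | succ d ih =>
        intro t ht
        have htk : t < k + 1 := by omega
        have hpar : ((k + 2) % 2 = 1) ↔ ((k + 1) % 2 = 0) := by omega
        rw [List.range'_succ, List.flatMap_cons, ih (t + 1) (by omega),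
            pvSeg_of_lt (k + 1) t htk]
        have hpair : (if (k + 2) % 2 = 1 then ((0 : Int), ((k + 1 : Nat) : Int))
            else ((t : Int), ((k + 1 : Nat) : Int))) = pvPair (k + 1) t := by
          rw [pvPair]
          by_cases hp : (k + 1) % 2 = 0
          · rw [if_pos hp, if_pos (hpar.mpr hp)]
          · rw [if_neg hp, if_neg (fun h => hp (hpar.mp h))]
        rw [if_pos htk, hpair]
        simp
    have haux := aux (k + 1) 0 (by omega)
    rw [pvHeapB,
        show List.range (k + 2) = List.range' 0 (k + 2) from List.range_eq_range' ..,
        haux]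

theorem pv_inner (n k : Nat) (hk : k < n)
    (ihk : ∀ c f, c.length = n → (∀ j, j < k → c.getD j 0 = 0) →
      pvLoopA (pvFuelA k + f) c 0 n = pvHeapB k ++ pvLoopA f c k n) :
    ∀ d t c f, t + d = k → c.length = n → (∀ j, j < k → c.getD j 0 = 0) →
      c.getD k 0 = (t : Int) →
      pvLoopA (d * (1 + pvFuelA k) + 1 + f) c k n
        = pvSeg k t ++ pvLoopA f (c.set k 0) (k + 1) n := by
  intro d
  induction d with
  | zero =>
    intro t c f ht hlen hz hct
    have ht' : t = k := by omega
    rw [ht'] at hct ⊢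
    have hfuel : 0 * (1 + pvFuelA k) + 1 + f = f + 1 := by omega
    rw [hfuel, pvLoopA, if_pos hk, if_neg (by rw [hct]; omega),
        pvSeg, if_neg (lt_irrefl k)]
    simp
  | succ d ih =>
    intro t c f ht hlen hz hct
    have htk : t < k := by omega
    have hfuel : (d + 1) * (1 + pvFuelA k) + 1 + f
        = (pvFuelA k + (d * (1 + pvFuelA k) + 1 + f)) + 1 := by ring
    rw [hfuel, pvLoopA, if_pos hk, if_pos (by rw [hct]; exact_mod_cast htk)]
    have hlen' : (c.set k (c.getD k 0 + 1)).length = n := by simp [hlen]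
    have hz' : ∀ j, j < k → (c.set k (c.getD k 0 + 1)).getD j 0 = 0 := by
      intro j hj
      rw [pv_getD_set_ne c k j _ (by omega)]
      exact hz j hj
    have hct' : (c.set k (c.getD k 0 + 1)).getD k 0 = ((t + 1 : Nat) : Int) := by
      rw [pv_getD_set_self c k _ (by omega), hct]
      push_cast; ring
    rw [ihk _ _ hlen' hz', ih (t + 1) _ f (by omega) hlen' hz' hct',
        List.set_set, pvSeg_of_lt k t htk]
    have hpair : (if k % 2 = 0 then ((0 : Int), (k : Int)) else (c.getD k 0, (k : Int)))
        = pvPair k t := by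
      rw [pvPair, hct]
    rw [hpair]
    simp

theorem pv_main : ∀ k n (c : List Int) f, k ≤ n → c.length = n →
    (∀ j, j < k → c.getD j 0 = 0) →
    pvLoopA (pvFuelA k + f) c 0 n = pvHeapB k ++ pvLoopA f c k n := by
  intro k
  induction k with
  | zero =>
    intro n c f _ _ _
    simp [pvFuelA, pvHeapB]
  | succ k ih =>
    intro n c f hkn hlen hz
    have hfuel : pvFuelA (k + 1) + f = pvFuelA k + (k * (1 + pvFuelA k) + 1 + f) := by
      rw [pvFuelA]; ring
    have hct : c.getD k 0 = ((0 : Nat) : Int) := by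
      simpa using hz k (by omega)
    have hk : k < n := by omega
    have ihk : ∀ c' f', (c' : List Int).length = n →
        (∀ j, j < k → c'.getD j 0 = 0) →
        pvLoopA (pvFuelA k + f') c' 0 n = pvHeapB k ++ pvLoopA f' c' k n :=
      fun c' f' hl hzz => ih n c' f' (by omega) hl hzz
    rw [hfuel, ihk c _ hlen (fun j hj => hz j (by omega)),
        pv_inner n k hk ihk k 0 c f (by omega) hlen (fun j hj => hz j (by omega)) hct,
        pv_set_zero_self c k (by omega) (by simpa using hz k (by omega)),
        pvHeapB_succ]
    simp

theorem pv_replicate_getD (m j : Nat) : (List.replicate m (0 : Int)).getD j 0 = 0 := by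
  by_cases h : j < m <;> simp [List.getD, h]

-- ===== VERDICT (by name: the statement is the Claim_ definition above) =====
theorem permutation_swaps_spec : Claim_equal_permutation_swaps := by
  intro n _
  unfold Spec_permutation_swaps permutation_swaps permutation_swaps_alt
  set m := n.toNat with hm
  rw [pv_main m m (List.replicate m 0) 1 le_rfl (by simp)
        (fun j _ => pv_replicate_getD m j),
      pvLoopA_stop 1 _ m m (lt_irrefl m)]
  simp
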